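-- pv_equiv track=rewrite | github.com/danielkucera/tesla-2bus | process.py | symbol_from_raw
-- ===== SOURCE A (Python) =====
-- def symbol_from_raw(raw):
--     result = ""
--     for val in raw:
--         if val > 56 and val < 87:
--             sym = "1"
--         elif val > 86 and val < 113:
--             sym = "-"
--         elif val > 112 and val < 138:
--             sym = "0"
--         else:
--             sym = "."
--         result += sym
--     return result
-- ===== SOURCE B (Python) =====
-- THRESHOLDS = [56, 86, 112, 137]
-- SYMBOLS = ".1-0."
--
-- def symbol_from_raw(raw):
--     return "".join(SYMBOLS[sum(t < val for t in THRESHOLDS)] for val in raw)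
-- ===== Notes on version B (the rewrite author's own statement) =====
-- stated objective: idiomatic
-- what changed: Replaces the chained if/elif range tests by a sorted threshold table with a parallel symbol string: each value is classified by counting thresholds below it and indexing the symbol string, and the result is built with ''.join instead of repeated string concatenation.
import Mathlib
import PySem

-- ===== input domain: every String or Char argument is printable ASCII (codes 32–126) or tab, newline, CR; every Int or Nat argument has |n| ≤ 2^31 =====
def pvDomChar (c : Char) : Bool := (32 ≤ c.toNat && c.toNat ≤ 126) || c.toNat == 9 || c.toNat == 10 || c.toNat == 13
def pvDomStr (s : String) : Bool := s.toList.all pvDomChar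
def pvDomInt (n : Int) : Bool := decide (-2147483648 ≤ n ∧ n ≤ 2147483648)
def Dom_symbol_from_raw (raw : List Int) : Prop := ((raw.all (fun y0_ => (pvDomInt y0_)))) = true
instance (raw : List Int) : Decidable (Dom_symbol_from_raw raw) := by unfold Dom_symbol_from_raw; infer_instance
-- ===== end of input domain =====

-- B replaces A's chained if/elif range tests by a threshold table + symbol lookup and a join (idiomatic; same cost).
-- ===== PORT A =====
def symbol_from_raw (raw : List Int) : String :=
  raw.foldl (fun result val =>
    result ++
      (if val > 56 && val < 87 then "1"
       else if val > 86 && val < 113 then "-"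
       else if val > 112 && val < 138 then "0"
       else ".")) ""

-- ===== PORT B =====
def pvThresholds : List Int := [56, 86, 112, 137]
def pvSymbols : List Char := ['.', '1', '-', '0', '.']
-- SYMBOLS[idx]: idx = count of thresholds below val is always < 5, so the getD default is never used
def symbol_from_raw_alt (raw : List Int) : String :=
  String.ofList (raw.map fun val => pvSymbols.getD (pvThresholds.countP (fun t => t < val)) '.')

-- ===== PRECONDITION & SPEC =====
def Spec_symbol_from_raw (raw : List Int) (out : String) : Prop := out = symbol_from_raw_alt raw
instance (raw : List Int) (out : String) : Decidable (Spec_symbol_from_raw raw out) := by unfold Spec_symbol_from_raw; infer_instance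

-- ===== CLAIM (what is proved, stated in full; the proofs are below) =====
def Claim_equal_symbol_from_raw : Prop := ∀ (raw : List Int), Dom_symbol_from_raw raw → Spec_symbol_from_raw raw (symbol_from_raw raw)

-- ===== LEMMAS AND PROOFS =====
-- the per-element symbol of A equals B's table lookup
theorem pv_char_eq (val : Int) :
    (if val > 56 && val < 87 then "1"
     else if val > 86 && val < 113 then "-"
     else if val > 112 && val < 138 then "0"
     else (".":String)).toList =
    [pvSymbols.getD (pvThresholds.countP (fun t => t < val)) '.'] := by
  simp only [pvThresholds, pvSymbols, List.countP_cons, List.countP_nil]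
  simp only [Bool.and_eq_true, decide_eq_true_eq]
  split_ifs <;> first | omega | decide

theorem pv_fold (raw : List Int) (acc : String) :
    (raw.foldl (fun result val =>
      result ++
        (if val > 56 && val < 87 then "1"
         else if val > 86 && val < 113 then "-"
         else if val > 112 && val < 138 then "0"
         else ".")) acc).toList =
    acc.toList ++ (raw.map fun val =>
      pvSymbols.getD (pvThresholds.countP (fun t => t < val)) '.') := by
  induction raw generalizing acc with
  | nil => simp
  | cons v t ih =>
    simp only [List.foldl_cons, List.map_cons]
    rw [ih, String.toList_append, pv_char_eq v]
    simp

theorem pv_eq (raw : List Int) : symbol_from_raw raw = symbol_from_raw_alt raw := by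
  apply String.toList_inj.mp
  rw [symbol_from_raw, symbol_from_raw_alt, pv_fold, String.toList_ofList]
  simp

-- ===== VERDICT (by name: the statement is the Claim_ definition above) =====
theorem symbol_from_raw_spec : Claim_equal_symbol_from_raw := by
  intro raw _
  unfold Spec_symbol_from_raw
  exact pv_eq raw
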